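-- pv_equiv track=rewrite | github.com/leeshinbi/algorithm_study | 프로그래머스/1/82612. 부족한 금액 계산하기/부족한 금액 계산하기.py | solution
-- ===== SOURCE A (Python) =====
-- def solution(price, money, count):
--     result = 0
--     for i in range(1,count+1):
--         result += price*i
--     if result >= money:
--         answer = result-money
--     else:
--         answer = 0
--
--
--     return answer
-- ===== SOURCE B (Python) =====
-- def solution(price, money, count):
--     n = count if count > 0 else 0
--     total = price * n * (n + 1) // 2
--     shortfall = total - money
--     return shortfall if shortfall > 0 else 0
-- ===== Notes on version B (the rewrite author's own statement) =====
-- stated objective: faster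
-- what changed: Replaced the O(count) accumulation loop with the closed-form arithmetic-series sum price*count*(count+1)//2.
import Mathlib
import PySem

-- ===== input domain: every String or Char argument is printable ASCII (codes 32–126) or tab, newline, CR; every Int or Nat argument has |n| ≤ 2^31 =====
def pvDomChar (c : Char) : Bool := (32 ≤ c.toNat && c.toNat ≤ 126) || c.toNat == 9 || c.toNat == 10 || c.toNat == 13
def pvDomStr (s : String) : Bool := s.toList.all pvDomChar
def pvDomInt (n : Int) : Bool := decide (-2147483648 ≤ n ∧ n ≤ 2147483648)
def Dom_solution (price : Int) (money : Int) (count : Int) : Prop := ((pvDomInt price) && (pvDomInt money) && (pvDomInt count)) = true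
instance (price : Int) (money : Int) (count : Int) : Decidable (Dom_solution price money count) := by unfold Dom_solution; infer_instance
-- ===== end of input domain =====

-- B replaces A's O(count) accumulation loop by the closed-form arithmetic-series sum (O(1)).


-- ===== PORT A =====
-- literal transliteration: accumulate result += price*i over range(1, count+1)
def solution (price : Int) (money : Int) (count : Int) : Int :=
  let result := (PySem.List.pyRange 1 (count + 1) 1).foldl (fun r i => r + price * i) 0
  if result ≥ money then result - money else 0

-- ===== PORT B =====
-- closed-form arithmetic series
def solution_alt (price : Int) (money : Int) (count : Int) : Int :=
  let n := if count > 0 then count else 0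
  let total := PySem.Int.floordiv (price * n * (n + 1)) 2
  let shortfall := total - money
  if shortfall > 0 then shortfall else 0

-- ===== PRECONDITION & SPEC =====
def Spec_solution (price : Int) (money : Int) (count : Int) (out : Int) : Prop := out = solution_alt price money count
instance (price : Int) (money : Int) (count : Int) (out : Int) : Decidable (Spec_solution price money count out) := by unfold Spec_solution; infer_instance

-- ===== CLAIM (what is proved, stated in full; the proofs are below) =====
def Claim_equal_solution : Prop := ∀ (price : Int) (money : Int) (count : Int), Dom_solution price money count → Spec_solution price money count (solution price money count)

-- ===== LEMMAS AND PROOFS =====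

/-- The loop sum over `range(1, n+1)` in closed form (stated with a `Nat` bound). -/
theorem pv_loop_sum (price : Int) (n : Nat) (r : Int) :
    (PySem.List.pyRange 1 ((n : Int) + 1) 1).foldl (fun r i => r + price * i) r
      = r + price * n * (n + 1) / 2 := by
  induction n generalizing r with
  | zero =>
    rw [PySem.List.pyRange_one_eq_nil (by omega)]
    simp
  | succ k ih =>
    rw [show ((k + 1 : Nat) : Int) + 1 = ((k : Int) + 1) + 1 by push_cast; ring,
        PySem.List.pyRange_one_succ_right (by omega), List.foldl_append, ih]
    have h2 : (2 : Int) ∣ (k : Int) * ((k : Int) + 1) := (Int.even_mul_succ_self (k : Int)).two_dvd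
    push_cast
    obtain ⟨t, ht⟩ := h2
    have hk : ((k : Int) + 1) * ((k : Int) + 1 + 1) = 2 * (t + (k : Int) + 1) := by linear_combination ht
    have e1 : price * (k : Int) * ((k : Int) + 1) = 2 * (price * t) := by
      rw [mul_assoc, ht]; ring
    have e2 : price * ((k : Int) + 1) * ((k : Int) + 1 + 1) = 2 * (price * (t + (k : Int) + 1)) := by
      rw [mul_assoc, hk]; ring
    simp only [List.foldl]
    rw [e1, e2, Int.mul_ediv_cancel_left _ (by norm_num), Int.mul_ediv_cancel_left _ (by norm_num)]
    ring

-- ===== VERDICT (by name: the statement is the Claim_ definition above) =====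
theorem solution_spec : Claim_equal_solution := by
  intro price money count _
  unfold Spec_solution solution solution_alt
  dsimp only
  by_cases hc : count > 0
  · have hn : count = ((count.toNat : Nat) : Int) := by omega
    rw [PySem.Int.floordiv_eq_ediv_of_pos (by norm_num)]
    simp only [if_pos hc]
    rw [hn, pv_loop_sum price count.toNat 0]
    simp only [zero_add]
    omega
  · rw [PySem.Int.floordiv_eq_ediv_of_pos (by norm_num)]
    simp only [if_neg hc]
    rw [PySem.List.pyRange_one_eq_nil (by omega)]
    simp
    omega
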